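-- pv_equiv track=rewrite | github.com/ChristianLaraa/Compiladores | Medio/interprete.py | obtenerListaInfija
-- ===== SOURCE A (Python) =====
-- def obtenerListaInfija(cadena_infija):
--     if (type(cadena_infija) == list):
--         return obtenerListaInfija("".join(cadena_infija))
--     '''Devuelve una cadena en notaci贸n infija dividida por sus elementos.'''
--     infija = []
--     cad = ''
--     for i in cadena_infija:
--         if i in ['+', '-', '*', '/', '(', ')', '^', '=']:
--             if cad != '':
--                 infija.append(cad)
--                 cad = ''
--             infija.append(i)
--         elif i == chr(32):  # Si es un espacio.
--             cad = cad
--         else: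
--             cad += i
--     if cad != '':
--         infija.append(cad)
--     return infija
-- ===== SOURCE B (Python) =====
-- def obtenerListaInfija(cadena_infija):
--     if type(cadena_infija) == list:
--         return obtenerListaInfija("".join(cadena_infija))
--     ops = '+-*/()^='
--     s = ''.join(ch for ch in cadena_infija if ch != chr(32))
--     tokens = []
--     i = 0
--     n = len(s)
--     while i < n:
--         if s[i] in ops:
--             tokens.append(s[i])
--             i += 1
--         else:
--             j = i
--             while j < n and s[j] not in ops:
--                 j += 1
--             tokens.append(s[i:j])
--             i = j
--     return tokens
-- ===== Notes on version B (the rewrite author's own statement) =====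
-- stated objective: alternative
-- what changed: Replaces the character-by-character fold with a mutable token buffer by a two-level scan: spaces are stripped up front, then the cursor either emits a single operator or jumps over a maximal operand run in one inner scan.
import Mathlib
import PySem

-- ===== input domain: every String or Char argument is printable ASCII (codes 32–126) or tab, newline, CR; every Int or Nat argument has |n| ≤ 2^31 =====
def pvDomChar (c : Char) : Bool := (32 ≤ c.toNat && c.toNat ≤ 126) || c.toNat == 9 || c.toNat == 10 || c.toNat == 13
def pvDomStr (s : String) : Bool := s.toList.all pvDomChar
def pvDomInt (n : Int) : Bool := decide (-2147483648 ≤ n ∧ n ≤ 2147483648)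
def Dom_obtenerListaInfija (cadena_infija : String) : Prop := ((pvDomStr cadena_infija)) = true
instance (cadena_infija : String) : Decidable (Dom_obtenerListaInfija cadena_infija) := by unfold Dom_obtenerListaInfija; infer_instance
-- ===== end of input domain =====

-- B replaces A's buffered character fold by a space-strip plus a two-level cursor scan
-- (emit a single operator, or jump over a maximal operand run); alternative decomposition, same cost.


def pvIsOp (c : Char) : Bool :=
  c = '+' || c = '-' || c = '*' || c = '/' || c = '(' || c = ')' || c = '^' || c = '='

-- ===== PORT A =====
-- the fold state is (infija, cad); cad is the pending operand buffer (as List Char)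
def pvStepA (st : List String × List Char) (i : Char) : List String × List Char :=
  if pvIsOp i then
    (st.1 ++ (if st.2 ≠ [] then [String.mk st.2] else []) ++ [String.mk [i]], [])
  else if i = ' ' then st
  else (st.1, st.2 ++ [i])

def obtenerListaInfija (cadena_infija : String) : List String :=
  let st := cadena_infija.toList.foldl pvStepA ([], [])
  st.1 ++ (if st.2 ≠ [] then [String.mk st.2] else [])

-- ===== PORT B =====
-- cursor scan over the space-stripped character list: an operator is a token by itself,
-- otherwise the maximal run of non-operator characters is one token.
def pvTok : List Char → List String
  | [] => []
  | c :: rest =>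
    if pvIsOp c then String.mk [c] :: pvTok rest
    else
      String.mk (c :: rest.takeWhile (fun x => ¬ pvIsOp x)) ::
        pvTok (rest.dropWhile (fun x => ¬ pvIsOp x))
termination_by l => l.length
decreasing_by
  · simp
  · exact lt_of_le_of_lt (List.length_dropWhile_le _ rest) (by simp)

def obtenerListaInfija_alt (cadena_infija : String) : List String :=
  pvTok (cadena_infija.toList.filter (fun ch => ch ≠ ' '))

-- ===== PRECONDITION & SPEC =====
def Spec_obtenerListaInfija (cadena_infija : String) (out : List String) : Prop := out = obtenerListaInfija_alt cadena_infija
instance (cadena_infija : String) (out : List String) : Decidable (Spec_obtenerListaInfija cadena_infija out) := by unfold Spec_obtenerListaInfija; infer_instance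

-- ===== CLAIM (what is proved, stated in full; the proofs are below) =====
def Claim_equal_obtenerListaInfija : Prop := ∀ (cadena_infija : String), Dom_obtenerListaInfija cadena_infija → Spec_obtenerListaInfija cadena_infija (obtenerListaInfija cadena_infija)

-- ===== LEMMAS AND PROOFS =====

-- A's fold ignores spaces, so it may be run on the space-filtered list.
theorem pvFoldA_filter (l : List Char) (st : List String × List Char) :
    l.foldl pvStepA st = (l.filter (fun ch => ch ≠ ' ')).foldl pvStepA st := by
  induction l generalizing st with
  | nil => rfl
  | cons c r ih =>
    by_cases hc : c = ' '
    · subst hc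
      simp [List.filter, pvStepA, pvIsOp, ih]
    · simp [List.filter, hc, ih]

-- recursive description of A's fold-then-flush, with explicit buffer
def pvRunA (cad : List Char) : List Char → List String
  | [] => if cad ≠ [] then [String.mk cad] else []
  | c :: r =>
    if pvIsOp c then
      (if cad ≠ [] then [String.mk cad] else []) ++ [String.mk [c]] ++ pvRunA [] r
    else pvRunA (cad ++ [c]) r

theorem pvFoldA_eq_runA (l : List Char) (hl : ∀ c ∈ l, c ≠ ' ')
    (inf : List String) (cad : List Char) :
    (let st := l.foldl pvStepA (inf, cad); st.1 ++ (if st.2 ≠ [] then [String.mk st.2] else []))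
      = inf ++ pvRunA cad l := by
  induction l generalizing inf cad with
  | nil => simp [pvRunA]
  | cons c r ih =>
    have hc : c ≠ ' ' := hl c (List.mem_cons_self ..)
    have hr : ∀ x ∈ r, x ≠ ' ' := fun x hx => hl x (List.mem_cons_of_mem _ hx)
    by_cases hop : pvIsOp c
    · simp only [List.foldl_cons, pvStepA, hop, if_pos, pvRunA, ih hr]
      simp
    · have hstep : pvStepA (inf, cad) c = (inf, cad ++ [c]) := by
        simp [pvStepA, hop, hc]
      have h2 := ih hr inf (cad ++ [c])
      simp only at h2 ⊢
      rw [List.foldl_cons, hstep, h2]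
      simp [pvRunA, hop]

theorem pvRunA_eq_tok (l : List Char) :
    (∀ cad : List Char, cad ≠ [] →
        pvRunA cad l = String.mk (cad ++ l.takeWhile (fun x => ¬ pvIsOp x)) ::
          pvTok (l.dropWhile (fun x => ¬ pvIsOp x)))
      ∧ pvRunA [] l = pvTok l := by
  induction l with
  | nil =>
    refine ⟨fun cad hcad => ?_, by simp [pvRunA, pvTok]⟩
    simp [pvRunA, pvTok, hcad]
  | cons c r ih =>
    by_cases hop : pvIsOp c
    · constructor
      · intro cad hcad
        conv_rhs => rw [pvTok.eq_def]
        simp [pvRunA, hop, hcad, ih.2]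
      · conv_rhs => rw [pvTok.eq_def]
        simp [pvRunA, hop, ih.2]
    · have step : ∀ cad : List Char, cad ≠ [] →
          pvRunA cad (c :: r) = String.mk (cad ++ (c :: r).takeWhile (fun x => ¬ pvIsOp x)) ::
            pvTok ((c :: r).dropWhile (fun x => ¬ pvIsOp x)) := by
        intro cad hcad
        have h1 := ih.1 (cad ++ [c]) (by simp)
        rw [show pvRunA cad (c :: r) = pvRunA (cad ++ [c]) r from by simp [pvRunA, hop], h1]
        simp [hop]
      refine ⟨step, ?_⟩
      rw [show pvRunA [] (c :: r) = pvRunA [c] r from by simp [pvRunA, hop],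
          ih.1 [c] (by simp)]
      conv_rhs => rw [pvTok.eq_def]
      simp [hop]

-- ===== VERDICT (by name: the statement is the Claim_ definition above) =====
theorem obtenerListaInfija_spec : Claim_equal_obtenerListaInfija := by
  intro s _
  unfold Spec_obtenerListaInfija obtenerListaInfija obtenerListaInfija_alt
  rw [pvFoldA_filter]
  have hfilt : ∀ c ∈ s.toList.filter (fun ch => ch ≠ ' '), c ≠ ' ' := by
    intro c hc
    simpa using (List.of_mem_filter hc)
  have := pvFoldA_eq_runA (s.toList.filter (fun ch => ch ≠ ' ')) hfilt [] []
  simp only at this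
  rw [this]
  simpa using (pvRunA_eq_tok (s.toList.filter (fun ch => ch ≠ ' '))).2
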